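-- pv_equiv track=rewrite | github.com/hmghaly/word_align | subword_utils.py | get_neighbor_offsets
-- ===== SOURCE A (Python) =====
-- def get_neighbor_offsets(word_i,sent_words,max_offset=3):
--   #cur_word=sent_words[word_i]
--   neighbor_offsets=[]
--   for inc0 in range(1,max_offset+1):
--     prev_word,next_word="",""
--     if word_i-inc0>=0: prev_word=sent_words[word_i-inc0]
--     if word_i+inc0<len(sent_words): next_word=sent_words[word_i+inc0]
--     neighbor_offsets+=[(prev_word,-inc0),(next_word,inc0)]
--   neighbor_offsets.sort(key=lambda x:x[1])
--   return neighbor_offsets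
-- ===== SOURCE B (Python) =====
-- def get_neighbor_offsets(word_i, sent_words, max_offset=3):
--     n = len(sent_words)
--     res = []
--     for o in range(-max_offset, max_offset + 1):
--         if o == 0:
--             continue
--         j = word_i + o
--         res.append((sent_words[j] if 0 <= j < n else "", o))
--     return res
-- ===== Notes on version B (the rewrite author's own statement) =====
-- stated objective: simpler
-- what changed: One pass over the signed offsets -max_offset..max_offset with a single 0<=j<len bounds check, emitting the pairs already in offset order, instead of building two tuples per inner step and sorting afterwards.
-- outside the precondition, e.g. on get_neighbor_offsets(-2, ['a', 'b'], 1): A returns [('', -1), ('b', 1)], B returns [('', -1), ('', 1)]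
import Mathlib
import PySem

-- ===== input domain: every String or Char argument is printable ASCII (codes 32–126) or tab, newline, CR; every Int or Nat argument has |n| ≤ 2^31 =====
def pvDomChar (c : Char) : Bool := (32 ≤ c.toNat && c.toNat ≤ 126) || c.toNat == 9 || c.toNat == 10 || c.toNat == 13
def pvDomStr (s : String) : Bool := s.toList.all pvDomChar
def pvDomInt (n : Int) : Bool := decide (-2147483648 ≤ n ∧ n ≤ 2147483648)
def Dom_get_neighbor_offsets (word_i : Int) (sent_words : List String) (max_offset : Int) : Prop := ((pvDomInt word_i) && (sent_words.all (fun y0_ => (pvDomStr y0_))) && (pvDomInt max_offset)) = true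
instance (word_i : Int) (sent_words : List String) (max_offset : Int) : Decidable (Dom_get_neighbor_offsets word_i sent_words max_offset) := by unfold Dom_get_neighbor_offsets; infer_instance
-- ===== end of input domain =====

-- B replaces A's two-tuples-per-step build followed by a sort with a single already-ordered pass
-- over the signed offsets and one bounds check (simpler; return-value equivalence only).

-- ===== PORT A =====
def get_neighbor_offsets (word_i : Int) (sent_words : List String) (max_offset : Int) : List (String × Int) :=
  let neighbor_offsets : List (String × Int) :=
    (PySem.List.pyRange 1 (max_offset + 1)).foldl (fun neighbor_offsets inc0 =>
      let prev_word : String := ""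
      let next_word : String := ""
      let prev_word := if word_i - inc0 ≥ 0 then PySem.List.pyGetD sent_words (word_i - inc0) prev_word else prev_word
      let next_word := if word_i + inc0 < (sent_words.length : Int) then PySem.List.pyGetD sent_words (word_i + inc0) next_word else next_word
      neighbor_offsets ++ [(prev_word, -inc0), (next_word, inc0)]) []
  PySem.List.sorted neighbor_offsets (fun x => x.2)

-- ===== PORT B =====
def get_neighbor_offsets_alt (word_i : Int) (sent_words : List String) (max_offset : Int) : List (String × Int) :=
  (PySem.List.pyRange (-max_offset) (max_offset + 1)).foldl (fun res o =>
    if o = 0 then res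
    else
      let j := word_i + o
      res ++ [(if 0 ≤ j ∧ j < (sent_words.length : Int) then PySem.List.pyGetD sent_words j "" else "", o)]) []

-- ===== PRECONDITION & SPEC =====
-- Pre_ admits the function's natural domain — word_i a position in sent_words, up to the harmless
-- boundaries -1 and len — or max_offset ≤ 0, where the loop body never runs.  It excludes word_i
-- outside [-1, len], where (with max_offset ≥ 1) A either raises IndexError (word_i > len, or
-- word_i < -len-1) or, for -len-1 ≤ word_i ≤ -2, still returns but with next-words wrapped around
-- from the END of the sentence: word_i is then not a position in the sentence and that value is an
-- artefact of Python negative indexing in A's unguarded next lookup, so those inputs are excluded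
-- rather than matched.
def Pre_get_neighbor_offsets (word_i : Int) (sent_words : List String) (max_offset : Int) : Prop :=
  max_offset ≤ 0 ∨ (-1 ≤ word_i ∧ word_i ≤ (sent_words.length : Int))
instance (word_i : Int) (sent_words : List String) (max_offset : Int) : Decidable (Pre_get_neighbor_offsets word_i sent_words max_offset) := by unfold Pre_get_neighbor_offsets; infer_instance
def pvWitness_get_neighbor_offsets : Int × List String × Int := (1, ["a", "b", "c"], 2)

def Spec_get_neighbor_offsets (word_i : Int) (sent_words : List String) (max_offset : Int) (out : List (String × Int)) : Prop := out = get_neighbor_offsets_alt word_i sent_words max_offset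
instance (word_i : Int) (sent_words : List String) (max_offset : Int) (out : List (String × Int)) : Decidable (Spec_get_neighbor_offsets word_i sent_words max_offset out) := by unfold Spec_get_neighbor_offsets; infer_instance

-- ===== CLAIM (what is proved, stated in full; the proofs are below) =====
def Claim_equal_get_neighbor_offsets : Prop := ∀ (word_i : Int) (sent_words : List String) (max_offset : Int), Dom_get_neighbor_offsets word_i sent_words max_offset → Pre_get_neighbor_offsets word_i sent_words max_offset → Spec_get_neighbor_offsets word_i sent_words max_offset (get_neighbor_offsets word_i sent_words max_offset)

-- ===== LEMMAS AND PROOFS =====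

-- the neighbor word B emits for absolute position j
def nbW (sent_words : List String) (j : Int) : String :=
  if 0 ≤ j ∧ j < (sent_words.length : Int) then PySem.List.pyGetD sent_words j "" else ""

-- A's two conditional lookups, as functions of the absolute position
def wPrev (sent_words : List String) (j : Int) : String :=
  if 0 ≤ j then PySem.List.pyGetD sent_words j "" else ""
def wNext (sent_words : List String) (j : Int) : String :=
  if j < (sent_words.length : Int) then PySem.List.pyGetD sent_words j "" else ""

-- B's loop is the already-ordered map over the nonzero offsets of the range
theorem alt_eq_map (word_i : Int) (sent_words : List String) (max_offset : Int) :
    get_neighbor_offsets_alt word_i sent_words max_offset =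
      ((PySem.List.pyRange (-max_offset) (max_offset + 1)).filter (fun o => !(o == 0))).map
        (fun o => (nbW sent_words (word_i + o), o)) := by
  unfold get_neighbor_offsets_alt nbW
  have h : ∀ (acc : List (String × Int)) (l : List Int),
      l.foldl (fun res o => if o = 0 then res
        else res ++ [(if 0 ≤ word_i + o ∧ word_i + o < (sent_words.length : Int) then PySem.List.pyGetD sent_words (word_i + o) "" else "", o)]) acc
      = l.foldl (fun res o => if (!(o == 0)) = true then res ++ [(if 0 ≤ word_i + o ∧ word_i + o < (sent_words.length : Int) then PySem.List.pyGetD sent_words (word_i + o) "" else "", o)] else res) acc := by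
    intro acc l
    induction l generalizing acc with
    | nil => rfl
    | cons x xs ih =>
        simp only [List.foldl_cons]
        by_cases hx : x = 0 <;> simp [hx, ih]
  rw [h, PySem.List.foldl_append_if]
  rfl

-- the nonzero offsets of range(-n, n+1) are range(-n,0) ++ range(1,n+1)  (for 1 ≤ n)
theorem filter_range_split (n : Int) (hn : 1 ≤ n) :
    (PySem.List.pyRange (-n) (n + 1)).filter (fun o => !(o == 0)) =
      PySem.List.pyRange (-n) 0 ++ PySem.List.pyRange 1 (n + 1) := by
  rw [PySem.List.pyRange_one_append (-n) 0 (n + 1) (by omega) (by omega),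
      PySem.List.pyRange_one_cons (show (0:Int) < n + 1 by omega)]
  rw [List.filter_append]
  have h1 : (PySem.List.pyRange (-n) 0).filter (fun o => !(o == 0)) = PySem.List.pyRange (-n) 0 := by
    apply List.filter_eq_self.mpr
    intro a ha
    have := PySem.List.mem_pyRange_one.mp ha
    simp; omega
  have h2 : (PySem.List.pyRange 1 (n + 1)).filter (fun o => !(o == 0)) = PySem.List.pyRange 1 (n + 1) := by
    apply List.filter_eq_self.mpr
    intro a ha
    have := PySem.List.mem_pyRange_one.mp ha
    simp; omega
  simp [h1, h2]

-- interleaved flatMap is a permutation of the two maps concatenated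
theorem flatMap_pair_perm {α β : Type} (l : List α) (f g : α → β) :
    (l.flatMap (fun x => [f x, g x])).Perm (l.map f ++ l.map g) := by
  induction l with
  | nil => simp
  | cons x xs ih =>
      simp only [List.flatMap_cons, List.map_cons, List.cons_append]
      refine List.Perm.cons _ ?_
      exact (List.Perm.cons _ ih).trans List.perm_middle.symm

-- range(-n, 0) is the reverse of the negated range(1, n+1)
theorem negRange (k : Nat) :
    PySem.List.pyRange (-(k : Int)) 0 = ((PySem.List.pyRange 1 ((k : Int) + 1)).map (fun i => -i)).reverse := by
  induction k with
  | zero =>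
      simp only [Nat.cast_zero, neg_zero, zero_add]
      rw [PySem.List.pyRange_one_eq_nil le_rfl, PySem.List.pyRange_one_eq_nil le_rfl]
      rfl
  | succ m ih =>
      have e1 : (-((m : Int) + 1) + 1) = -(m : Int) := by ring
      have h1 : PySem.List.pyRange (-((m : Int) + 1)) 0 =
          (-((m : Int) + 1)) :: PySem.List.pyRange (-(m : Int)) 0 := by
        rw [PySem.List.pyRange_one_cons (by omega), e1]
      have hr : PySem.List.pyRange 1 (((m : Int) + 1) + 1) =
          PySem.List.pyRange 1 ((m : Int) + 1) ++ [(m : Int) + 1] := by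
        exact PySem.List.pyRange_one_succ_right (by omega)
      push_cast
      rw [h1, ih, hr]
      simp

-- every integer range with step one is strictly increasing
theorem pyRange_one_pairwise (a b : Int) : (PySem.List.pyRange a b).Pairwise (· < ·) := by
  by_cases h : b ≤ a
  · rw [PySem.List.pyRange_one_eq_nil h]; exact List.Pairwise.nil
  · rw [PySem.List.pyRange_one_cons (by omega)]
    refine List.Pairwise.cons ?_ (pyRange_one_pairwise (a + 1) b)
    intro x hx
    have := PySem.List.mem_pyRange_one.mp hx
    omega
termination_by (b - a).toNat
decreasing_by simp; omega

-- the sorted interleaved build, named: negative-offset entries then positive-offset entries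
theorem sorted_flatMap_eq (G H : Int → String × Int) (n : Int) (hn : 1 ≤ n)
    (hG : ∀ o, (G o).2 = o) (hH : ∀ o, (H o).2 = o) :
    PySem.List.sorted ((PySem.List.pyRange 1 (n + 1)).flatMap (fun i => [G (-i), H i])) (fun x => x.2) =
      (PySem.List.pyRange (-n) 0).map G ++ (PySem.List.pyRange 1 (n + 1)).map H := by
  apply PySem.List.sorted_eq_of_perm_of_pairwise_lt
  · have hperm1 := flatMap_pair_perm (PySem.List.pyRange 1 (n + 1)) (fun i => G (-i)) (fun i => H i)
    have hneg : (PySem.List.pyRange (-n) 0).map G =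
        ((PySem.List.pyRange 1 (n + 1)).map (fun i => G (-i))).reverse := by
      have hk : ((n.toNat : Int)) = n := by omega
      have h := negRange n.toNat
      rw [hk] at h
      rw [h, List.map_reverse, List.map_map]
      rfl
    rw [hneg]
    refine List.Perm.trans ?_ hperm1.symm
    exact List.Perm.append (List.reverse_perm _) (List.Perm.refl _)
  · rw [List.pairwise_append]
    refine ⟨?_, ?_, ?_⟩
    · rw [List.pairwise_map]
      refine (pyRange_one_pairwise _ _).imp (fun {a b} h => ?_)
      simp only [hG]; exact h
    · rw [List.pairwise_map]
      refine (pyRange_one_pairwise _ _).imp (fun {a b} h => ?_)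
      simp only [hH]; exact h
    · intro a ha b hb
      rcases List.mem_map.mp ha with ⟨o1, ho1, rfl⟩
      rcases List.mem_map.mp hb with ⟨o2, ho2, rfl⟩
      have h1 := PySem.List.mem_pyRange_one.mp ho1
      have h2 := PySem.List.mem_pyRange_one.mp ho2
      simp only [hG, hH]
      omega

-- A, characterised: its sorted output is the ordered pass through wPrev/wNext (any word_i; 1 ≤ n)
theorem a_eq (word_i : Int) (sent_words : List String) (max_offset : Int) (hn : 1 ≤ max_offset) :
    get_neighbor_offsets word_i sent_words max_offset =
      (PySem.List.pyRange (-max_offset) 0).map (fun o => (wPrev sent_words (word_i + o), o)) ++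
      (PySem.List.pyRange 1 (max_offset + 1)).map (fun o => (wNext sent_words (word_i + o), o)) := by
  unfold get_neighbor_offsets
  rw [PySem.List.foldl_append_eq_flatMap, List.nil_append]
  have hbody : (fun inc0 : Int =>
      [((if word_i - inc0 ≥ 0 then PySem.List.pyGetD sent_words (word_i - inc0) "" else ""), -inc0),
       ((if word_i + inc0 < (sent_words.length : Int) then PySem.List.pyGetD sent_words (word_i + inc0) "" else ""), inc0)]) =
      (fun i : Int => [(fun o => (wPrev sent_words (word_i + o), o)) (-i),
                       (fun o => (wNext sent_words (word_i + o), o)) i]) := by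
    funext i
    simp only [wPrev, wNext, sub_eq_add_neg, ge_iff_le]
  rw [hbody]
  exact sorted_flatMap_eq (fun o => (wPrev sent_words (word_i + o), o))
    (fun o => (wNext sent_words (word_i + o), o)) max_offset hn (fun o => rfl) (fun o => rfl)

-- B, characterised the same way (1 ≤ n)
theorem b_eq (word_i : Int) (sent_words : List String) (max_offset : Int) (hn : 1 ≤ max_offset) :
    get_neighbor_offsets_alt word_i sent_words max_offset =
      (PySem.List.pyRange (-max_offset) 0).map (fun o => (nbW sent_words (word_i + o), o)) ++
      (PySem.List.pyRange 1 (max_offset + 1)).map (fun o => (nbW sent_words (word_i + o), o)) := by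
  rw [alt_eq_map, filter_range_split max_offset hn, List.map_append]

-- on the negative offsets the guarded prev lookup IS B's bounds check (needs word_i ≤ len)
theorem neg_maps_eq (word_i : Int) (sent_words : List String) (max_offset : Int)
    (hhi : word_i ≤ (sent_words.length : Int)) :
    (PySem.List.pyRange (-max_offset) 0).map (fun o => (wPrev sent_words (word_i + o), o)) =
    (PySem.List.pyRange (-max_offset) 0).map (fun o => (nbW sent_words (word_i + o), o)) := by
  apply List.map_congr_left
  intro o ho
  have hb := PySem.List.mem_pyRange_one.mp ho
  unfold wPrev nbW
  by_cases h : 0 ≤ word_i + o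
  · rw [if_pos h, if_pos ⟨h, by omega⟩]
  · rw [if_neg h, if_neg (by omega)]

-- ===== VERDICT (by name: the statements are the Claim_ definitions above) =====
theorem get_neighbor_offsets_spec : Claim_equal_get_neighbor_offsets := by
  intro word_i sent_words max_offset _hdom hpre
  unfold Spec_get_neighbor_offsets
  by_cases hn : max_offset ≤ 0
  · -- both loops contribute nothing
    unfold get_neighbor_offsets
    rw [PySem.List.pyRange_one_eq_nil (by omega), alt_eq_map]
    have hf : (PySem.List.pyRange (-max_offset) (max_offset + 1)).filter (fun o => !(o == 0)) = [] := by
      rw [List.filter_eq_nil_iff]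
      intro a ha
      have := PySem.List.mem_pyRange_one.mp ha
      have : a = 0 := by omega
      simp [this]
    rw [hf]
    simp only [List.foldl_nil, List.map_nil]
    rw [PySem.List.sorted_eq_nil_iff]
  · have hn1 : 1 ≤ max_offset := by omega
    have hw : -1 ≤ word_i ∧ word_i ≤ (sent_words.length : Int) := by
      rcases hpre with h | h
      · omega
      · exact h
    rw [a_eq word_i sent_words max_offset hn1, b_eq word_i sent_words max_offset hn1,
        neg_maps_eq word_i sent_words max_offset (by omega)]
    congr 1
    apply List.map_congr_left
    intro o ho
    have hb := PySem.List.mem_pyRange_one.mp ho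
    unfold wNext nbW
    by_cases h2 : word_i + o < (sent_words.length : Int)
    · rw [if_pos h2, if_pos ⟨by omega, h2⟩]
    · rw [if_neg h2, if_neg (by omega)]
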